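-- pv_equiv track=rewrite | github.com/brandon-rhodes/blog | bin/builder.py | fixdollars
-- ===== SOURCE A (Python) =====
-- def fixdollars(string):
--     while '$$' in string:
--         string = string.replace('$$', r'\[', 1)
--         string = string.replace('$$', r'\]', 1)
--     string = string.replace(r'\$', 'PUT A REAL DOLLAR SIGN HERE')
--     while '$' in string:
--         string = string.replace('$', r'\(', 1)
--         string = string.replace('$', r'\)', 1)
--     string = string.replace('PUT A REAL DOLLAR SIGN HERE', '$')
--     return string
-- ===== SOURCE B (Python) =====
-- def fixdollars(string):
--     out = []
--     i = 0
--     n = len(string)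
--     dopen = True   # next $$ becomes \[
--     sopen = True   # next lone $ becomes \(
--     while i < n:
--         c = string[i]
--         if c == '$':
--             if i + 1 < n and string[i + 1] == '$':
--                 out.append('\\[' if dopen else '\\]')
--                 dopen = not dopen
--                 i += 2
--             else:
--                 out.append('\\(' if sopen else '\\)')
--                 sopen = not sopen
--                 i += 1
--         elif c == '\\' and i + 1 < n and string[i + 1] == '$' and not (i + 2 < n and string[i + 2] == '$'):
--             out.append('$')
--             i += 2
--         else:
--             out.append(c)
--             i += 1
--     return ''.join(out)
-- ===== Notes on version B (the rewrite author's own statement) =====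
-- stated objective: alternative
-- what changed: A repeatedly rescans and rebuilds the string with first-occurrence replaces inside two while loops, using a magic sentinel text to protect escaped dollar signs; B is a single left-to-right scan that toggles between the opening and closing bracket pairs for double and single dollar delimiters and unescapes a backslash-escaped dollar directly, with no sentinel.
-- intended difference: On inputs that literally contain the sentinel text 'PUT A REAL DOLLAR SIGN HERE', A's final sentinel substitution turns that user text into a dollar sign; B, which needs no sentinel, leaves such text alone, which is the intended behaviour. — e.g. on fixdollars("PUT A REAL DOLLAR SIGN HERE"): A returns "$", B returns "PUT A REAL DOLLAR SIGN HERE"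
import Mathlib
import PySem

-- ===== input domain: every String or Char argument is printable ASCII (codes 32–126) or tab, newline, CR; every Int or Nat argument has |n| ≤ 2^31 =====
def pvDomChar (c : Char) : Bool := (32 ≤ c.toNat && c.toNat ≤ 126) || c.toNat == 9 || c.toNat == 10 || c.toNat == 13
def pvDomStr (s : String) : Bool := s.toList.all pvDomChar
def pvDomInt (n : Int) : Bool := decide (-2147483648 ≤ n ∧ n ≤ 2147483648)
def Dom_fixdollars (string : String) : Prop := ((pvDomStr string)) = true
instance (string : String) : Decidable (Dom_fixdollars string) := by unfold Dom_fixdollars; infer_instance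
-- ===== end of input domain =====

-- B replaces A's repeated first-occurrence-replace while-loops (and their sentinel round-trip
-- protecting escaped dollars) by one left-to-right scan toggling the open/close delimiters;
-- on inputs containing the literal sentinel text A collapses that text to a dollar sign while
-- B leaves it alone (see D_fixdollars).


-- ===== PORT A =====

-- Python's  s.replace(old, new, 1)  (leftmost occurrence only); exact for old ≠ '' — A only
-- calls it with old = '$$' and old = '$'.
def replaceOnce (s old new : List Char) : List Char :=
  match s with
  | [] => []
  | c :: t =>
    if old.isPrefixOf (c :: t) then new ++ t.drop (old.length - 1)
    else c :: replaceOnce t old new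

def pvSentinel : List Char :=
  ['P','U','T',' ','A',' ','R','E','A','L',' ','D','O','L','L','A','R',' ','S','I','G','N',' ','H','E','R','E']

-- termination helpers for A's while loops (each iteration removes '$' characters)
theorem count_replaceOnce_le (s old new : List Char) (hnew : new.count '$' = 0) :
    (replaceOnce s old new).count '$' ≤ s.count '$' := by
  induction s with
  | nil => simp [replaceOnce]
  | cons c t ih =>
    rw [replaceOnce]
    split
    · simp [List.count_append, hnew, List.count_cons]
      calc (t.drop (old.length - 1)).count '$' ≤ t.count '$' :=
            List.Sublist.count_le '$' (List.drop_sublist _ _)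
        _ ≤ t.count '$' + if c = '$' then 1 else 0 := by split <;> omega
    · simp only [List.count_cons]
      omega

theorem count_replaceOnce_lt (s old new : List Char) (hnew : new.count '$' = 0)
    (hdol : '$' ∈ old) (hocc : old <:+: s) :
    (replaceOnce s old new).count '$' < s.count '$' := by
  induction s with
  | nil =>
    exfalso
    have : old = [] := List.eq_nil_of_infix_nil hocc
    simp [this] at hdol
  | cons c t ih =>
    rw [replaceOnce]
    split
    · rename_i hpre
      rw [List.isPrefixOf_iff_prefix] at hpre
      obtain ⟨u, hu⟩ := hpre
      have hlen : 1 ≤ old.length := by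
        cases old with
        | nil => simp at hdol
        | cons _ _ => simp
      have hdropu : t.drop (old.length - 1) = u := by
        have h2 := congrArg (List.drop old.length) hu
        rw [List.drop_left] at h2
        rw [h2]
        cases old with
        | nil => simp at hdol
        | cons o ot => simp
      have hcnt : (c :: t).count '$' = old.count '$' + u.count '$' := by
        rw [← hu, List.count_append]
      have : 1 ≤ old.count '$' := List.one_le_count_iff.mpr hdol
      simp [List.count_append, hnew, hdropu]
      omega
    · rename_i hpre
      rw [List.isPrefixOf_iff_prefix] at hpre
      have hocc' : old <:+: t := by
        rcases List.infix_cons_iff.mp hocc with h | h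
        · exact absurd h hpre
        · exact h
      simp only [List.count_cons]
      have := ih hocc'
      omega

-- while '$$' in string: string = string.replace('$$', '\[', 1).replace('$$', '\]', 1)
def loopDD (l : List Char) : List Char :=
  if h : PySem.Chars.isIn ['$', '$'] l = true then
    loopDD (replaceOnce (replaceOnce l ['$', '$'] ['\\', '[']) ['$', '$'] ['\\', ']'])
  else l
  termination_by l.count '$'
  decreasing_by
    have hocc : ['$', '$'] <:+: l := (PySem.Chars.isIn_iff_infix _ _).mp h
    have h1 := count_replaceOnce_lt l ['$', '$'] ['\\', '['] (by decide) (by decide) hocc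
    have h2 := count_replaceOnce_le (replaceOnce l ['$', '$'] ['\\', '[']) ['$', '$'] ['\\', ']'] (by decide)
    omega

-- while '$' in string: string = string.replace('$', '\(', 1).replace('$', '\)', 1)
def loopD (l : List Char) : List Char :=
  if h : PySem.Chars.isIn ['$'] l = true then
    loopD (replaceOnce (replaceOnce l ['$'] ['\\', '(']) ['$'] ['\\', ')'])
  else l
  termination_by l.count '$'
  decreasing_by
    have hocc : ['$'] <:+: l := (PySem.Chars.isIn_iff_infix _ _).mp h
    have h1 := count_replaceOnce_lt l ['$'] ['\\', '('] (by decide) (by decide) hocc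
    have h2 := count_replaceOnce_le (replaceOnce l ['$'] ['\\', '(']) ['$'] ['\\', ')'] (by decide)
    omega

def fixdollars (string : String) : String :=
  let l1 := loopDD string.toList
  let l2 := PySem.Chars.replace l1 ['\\', '$'] pvSentinel
  let l3 := loopD l2
  String.ofList (PySem.Chars.replace l3 pvSentinel ['$'])

-- ===== PORT B =====

-- Source B's single while loop over the indices, transcribed as recursion on the remaining
-- characters; the cases are Source B's if-chain in the same order ('$$' pair, lone '$',
-- escaped '\$' — with the '\','$','$' shape falling to the plain-character else branch).
def scanB : List Char → Bool → Bool → List Char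
  | [], _, _ => []
  | '$' :: '$' :: r, dopen, sopen =>
    (if dopen then ['\\', '['] else ['\\', ']']) ++ scanB r (!dopen) sopen
  | '$' :: r, dopen, sopen =>
    (if sopen then ['\\', '('] else ['\\', ')']) ++ scanB r dopen (!sopen)
  | '\\' :: '$' :: '$' :: r, dopen, sopen => '\\' :: scanB ('$' :: '$' :: r) dopen sopen
  | '\\' :: '$' :: r, dopen, sopen => '$' :: scanB r dopen sopen
  | c :: r, dopen, sopen => c :: scanB r dopen sopen

def fixdollars_alt (string : String) : String :=
  String.ofList (scanB string.toList true true)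

-- ===== PRECONDITION & SPEC =====

-- On inputs that literally contain the sentinel text 'PUT A REAL DOLLAR SIGN HERE', A's final
-- sentinel substitution turns that user text into a dollar sign; B, which needs no sentinel,
-- leaves such text alone, which is the intended behaviour.
def D_fixdollars (string : String) : Prop :=
  PySem.Str.isIn "PUT A REAL DOLLAR SIGN HERE" string = true
instance (string : String) : Decidable (D_fixdollars string) := by unfold D_fixdollars; infer_instance

def Spec_fixdollars (string : String) (out : String) : Prop :=
  ¬ D_fixdollars string → out = fixdollars_alt string
instance (string : String) (out : String) : Decidable (Spec_fixdollars string out) := by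
  unfold Spec_fixdollars; infer_instance

def pvDiffWitness_fixdollars : String := "PUT A REAL DOLLAR SIGN HERE"
def pvDiffWitnessOut_fixdollars : String × String := ("$", "PUT A REAL DOLLAR SIGN HERE")

-- ===== CLAIM (what is proved, stated in full; the proofs are below) =====
def Claim_unchanged_fixdollars : Prop :=
  ∀ (string : String), Dom_fixdollars string → Spec_fixdollars string (fixdollars string)
def Claim_changed_fixdollars : Prop :=
  Dom_fixdollars (pvDiffWitness_fixdollars) ∧ D_fixdollars (pvDiffWitness_fixdollars) ∧
    fixdollars (pvDiffWitness_fixdollars) = pvDiffWitnessOut_fixdollars.1 ∧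
    fixdollars_alt (pvDiffWitness_fixdollars) = pvDiffWitnessOut_fixdollars.2 ∧
    pvDiffWitnessOut_fixdollars.1 ≠ pvDiffWitnessOut_fixdollars.2
def Claim_exact_fixdollars : Prop :=
  ∀ (string : String), Dom_fixdollars string → D_fixdollars string →
    fixdollars string ≠ fixdollars_alt string

-- ===== LEMMAS AND PROOFS =====

-- ---- proof-side helpers: structural one-pass versions of A's three phases ----

-- what A's '$$' while-loop computes, as one pass
def scanDD : List Char → Bool → List Char
  | [], _ => []
  | '$' :: '$' :: r, d => (if d then ['\\', '['] else ['\\', ']']) ++ scanDD r (!d)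
  | c :: r, d => c :: scanDD r d

-- what A's lone-'$' while-loop computes, as one pass
def scanS : List Char → Bool → List Char
  | [], _ => []
  | '$' :: r, s => (if s then ['\\', '('] else ['\\', ')']) ++ scanS r (!s)
  | c :: r, s => c :: scanS r s

-- structural form of PySem.Chars.replace (replace all, old ≠ '')
def repAll (s old new : List Char) : List Char :=
  match s with
  | [] => []
  | c :: t =>
    if old.isPrefixOf (c :: t) then new ++ repAll (t.drop (old.length - 1)) old new
    else c :: repAll t old new
  termination_by s.length
  decreasing_by
    · simp only [List.length_cons]
      have := List.length_drop (l := t) (i := old.length - 1)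
      omega
    · simp

theorem go_eq_repAll (old new : List Char) (hold : old ≠ []) :
    ∀ (fuel : Nat) (l acc : List Char), l.length ≤ fuel →
      PySem.Chars.replace.go old new fuel l acc = acc.reverse ++ repAll l old new := by
  intro fuel
  induction fuel with
  | zero =>
    intro l acc hl
    have : l = [] := List.eq_nil_of_length_eq_zero (by omega)
    subst this
    simp [PySem.Chars.replace.go, repAll]
  | succ fuel ih =>
    intro l acc hl
    match l with
    | [] => simp [PySem.Chars.replace.go, repAll]
    | c :: t =>
      rw [PySem.Chars.replace.go]
      rw [repAll]
      by_cases hp : old.isPrefixOf (c :: t) = true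
      · rw [if_pos hp, if_pos hp]
        have hdrop : List.drop old.length (c :: t) = t.drop (old.length - 1) := by
          cases old with
          | nil => exact absurd rfl hold
          | cons o ot => simp
        rw [hdrop, ih _ _ (by have := List.length_drop (l := t) (i := old.length - 1); simp at hl; omega)]
        simp
      · rw [if_neg hp, if_neg hp, ih _ _ (by simp at hl; omega)]
        simp

theorem replace_eq_repAll (s old new : List Char) (hold : old ≠ []) :
    PySem.Chars.replace s old new = repAll s old new := by
  rw [PySem.Chars.replace]
  rw [if_neg (by simp [List.isEmpty_iff]; exact hold)]
  rw [go_eq_repAll old new hold s.length s [] le_rfl]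
  simp

-- ---- phase 1: the '$$' loop is scanDD ----

theorem scanDD_cons (c : Char) (r : List Char) (d : Bool) (hc : c ≠ '$') :
    scanDD (c :: r) d = c :: scanDD r d := by
  rcases r with _ | ⟨c2, r⟩ <;> simp [scanDD, hc]

theorem scanDD_cons2 (c2 : Char) (r : List Char) (d : Bool) (hc2 : c2 ≠ '$') :
    scanDD ('$' :: c2 :: r) d = '$' :: scanDD (c2 :: r) d := by
  simp [scanDD, hc2]

theorem scanS_cons (c : Char) (r : List Char) (b : Bool) (hc : c ≠ '$') :
    scanS (c :: r) b = c :: scanS r b := by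
  simp [scanS, hc]

theorem ro_cons_ne (t : List Char) (new : List Char) (c : Char) (hc : c ≠ '$') :
    replaceOnce (c :: t) ['$', '$'] new = c :: replaceOnce t ['$', '$'] new := by
  rw [replaceOnce, if_neg]
  intro hp
  exact hc ((List.cons_prefix_cons.mp (List.isPrefixOf_iff_prefix.mp hp)).1).symm

theorem ro_cons2_ne (t : List Char) (new : List Char) (c2 : Char) (hc2 : c2 ≠ '$') :
    replaceOnce ('$' :: c2 :: t) ['$', '$'] new = '$' :: replaceOnce (c2 :: t) ['$', '$'] new := by
  rw [replaceOnce, if_neg]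
  intro hp
  have h2 := (List.cons_prefix_cons.mp (List.isPrefixOf_iff_prefix.mp hp)).2
  exact hc2 ((List.cons_prefix_cons.mp h2).1).symm

theorem replaceOnce_of_not_infix (s old new : List Char) (h : ¬ old <:+: s) :
    replaceOnce s old new = s := by
  induction s with
  | nil => rfl
  | cons c t ih =>
    rw [replaceOnce]
    rw [if_neg (fun hp => h (List.isPrefixOf_iff_prefix.mp hp).isInfix)]
    rw [ih (fun hi => h (hi.trans (List.suffix_cons c t).isInfix))]

theorem scanDD_replaceOnce (s : List Char) (d : Bool) (hocc : ['$', '$'] <:+: s) :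
    scanDD (replaceOnce s ['$', '$'] (if d then ['\\', '['] else ['\\', ']'])) (!d)
      = scanDD s d := by
  induction s generalizing d with
  | nil => exact absurd (List.eq_nil_of_infix_nil hocc) (by decide)
  | cons c t ih =>
    by_cases hc : c = '$'
    · subst hc
      match t with
      | [] =>
        exfalso
        rcases hocc with ⟨u, v, huv⟩
        have := congrArg List.length huv
        simp at this
        omega
      | c2 :: t2 =>
        by_cases hc2 : c2 = '$'
        · subst hc2
          have h1 : replaceOnce ('$' :: '$' :: t2) ['$', '$']
              (if d then ['\\', '['] else ['\\', ']'])
              = (if d then ['\\', '['] else ['\\', ']']) ++ t2 := by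
            rw [replaceOnce, if_pos (by simp [List.isPrefixOf])]
            simp
          rw [h1]
          cases d <;>
            simp [scanDD, scanDD_cons, List.cons_append]
        · have hocc' : ['$', '$'] <:+: c2 :: t2 := by
            rcases List.infix_cons_iff.mp hocc with hp | hi
            · exfalso
              have h2 := (List.cons_prefix_cons.mp hp).2
              exact hc2 ((List.cons_prefix_cons.mp h2).1).symm
            · exact hi
          rw [ro_cons2_ne _ _ _ hc2, ro_cons_ne _ _ _ hc2]
          have hihl := ih d hocc'
          rw [ro_cons_ne _ _ _ hc2] at hihl
          rw [scanDD_cons2 _ _ _ hc2]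
          · rw [hihl, ← scanDD_cons2 _ _ _ hc2]
    · have hocc' : ['$', '$'] <:+: t := by
        rcases List.infix_cons_iff.mp hocc with hp | hi
        · exact absurd ((List.cons_prefix_cons.mp hp).1).symm hc
        · exact hi
      rw [ro_cons_ne _ _ _ hc, scanDD_cons _ _ _ hc, ih d hocc', scanDD_cons _ _ _ hc]

theorem scanDD_id (s : List Char) (h : ¬ ['$', '$'] <:+: s) : ∀ d, scanDD s d = s := by
  induction s with
  | nil => intro d; rfl
  | cons c t ih =>
    intro d
    by_cases hc : c = '$'
    · subst hc
      match t with
      | [] => simp [scanDD]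
      | c2 :: t2 =>
        by_cases hc2 : c2 = '$'
        · subst hc2
          exact absurd ⟨[], t2, rfl⟩ h
        · rw [scanDD_cons2 _ _ _ hc2, ih (fun hi => h (hi.trans (List.suffix_cons _ _).isInfix))]
    · rw [scanDD_cons _ _ _ hc, ih (fun hi => h (hi.trans (List.suffix_cons _ _).isInfix))]

theorem loopDD_eq (l : List Char) : loopDD l = scanDD l true := by
  induction l using loopDD.induct with
  | case1 l h ih =>
    rw [loopDD, dif_pos h, ih]
    have hocc : ['$', '$'] <:+: l := (PySem.Chars.isIn_iff_infix _ _).mp h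
    have h1 : scanDD (replaceOnce l ['$', '$'] ['\\', '[']) false = scanDD l true := by
      simpa using scanDD_replaceOnce l true hocc
    by_cases h2 : ['$', '$'] <:+: replaceOnce l ['$', '$'] ['\\', '[']
    · have h3 := scanDD_replaceOnce (replaceOnce l ['$', '$'] ['\\', '[']) false h2
      simp only [Bool.not_false, if_neg Bool.false_ne_true] at h3
      rw [h3, h1]
    · rw [replaceOnce_of_not_infix _ _ _ h2, scanDD_id _ h2, ← h1, scanDD_id _ h2]
  | case2 l h =>
    rw [loopDD, dif_neg h, scanDD_id]
    exact fun hi => h ((PySem.Chars.isIn_iff_infix _ _).mpr hi)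

-- ---- phase 3: the lone-'$' loop is scanS ----

theorem ro1_cons_ne (t : List Char) (new : List Char) (c : Char) (hc : c ≠ '$') :
    replaceOnce (c :: t) ['$'] new = c :: replaceOnce t ['$'] new := by
  rw [replaceOnce, if_neg]
  intro hp
  exact hc ((List.cons_prefix_cons.mp (List.isPrefixOf_iff_prefix.mp hp)).1).symm

theorem scanS_replaceOnce (s : List Char) (b : Bool) (hocc : ['$'] <:+: s) :
    scanS (replaceOnce s ['$'] (if b then ['\\', '('] else ['\\', ')'])) (!b)
      = scanS s b := by
  induction s generalizing b with
  | nil => exact absurd (List.eq_nil_of_infix_nil hocc) (by decide)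
  | cons c t ih =>
    by_cases hc : c = '$'
    · subst hc
      have h1 : replaceOnce ('$' :: t) ['$'] (if b then ['\\', '('] else ['\\', ')'])
          = (if b then ['\\', '('] else ['\\', ')']) ++ t := by
        rw [replaceOnce, if_pos (by simp [List.isPrefixOf])]
        simp
      rw [h1]
      cases b <;> simp [scanS, scanS_cons, List.cons_append]
    · have hocc' : ['$'] <:+: t := by
        rcases List.infix_cons_iff.mp hocc with hp | hi
        · exact absurd ((List.cons_prefix_cons.mp hp).1).symm hc
        · exact hi
      rw [ro1_cons_ne _ _ _ hc, scanS_cons _ _ _ hc, ih b hocc', scanS_cons _ _ _ hc]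

theorem scanS_id (s : List Char) (h : ¬ ['$'] <:+: s) : ∀ b, scanS s b = s := by
  induction s with
  | nil => intro b; rfl
  | cons c t ih =>
    intro b
    by_cases hc : c = '$'
    · exact absurd ⟨[], t, by rw [hc]; rfl⟩ h
    · rw [scanS_cons _ _ _ hc, ih (fun hi => h (hi.trans (List.suffix_cons _ _).isInfix))]

theorem loopD_eq (l : List Char) : loopD l = scanS l true := by
  induction l using loopD.induct with
  | case1 l h ih =>
    rw [loopD, dif_pos h, ih]
    have hocc : ['$'] <:+: l := (PySem.Chars.isIn_iff_infix _ _).mp h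
    have h1 : scanS (replaceOnce l ['$'] ['\\', '(']) false = scanS l true := by
      simpa using scanS_replaceOnce l true hocc
    by_cases h2 : ['$'] <:+: replaceOnce l ['$'] ['\\', '(']
    · have h3 := scanS_replaceOnce (replaceOnce l ['$'] ['\\', '(']) false h2
      simp only [Bool.not_false, if_neg Bool.false_ne_true] at h3
      rw [h3, h1]
    · rw [replaceOnce_of_not_infix _ _ _ h2, scanS_id _ h2, ← h1, scanS_id _ h2]
  | case2 l h =>
    rw [loopD, dif_neg h, scanS_id]
    exact fun hi => h ((PySem.Chars.isIn_iff_infix _ _).mpr hi)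

-- A without its while loops
theorem fixdollars_eq (s : String) :
    fixdollars s = String.ofList (PySem.Chars.replace
      (scanS (PySem.Chars.replace (scanDD s.toList true) ['\\', '$'] pvSentinel) true)
      pvSentinel ['$']) := by
  simp only [fixdollars, loopDD_eq, loopD_eq]

-- ---- step equations for the sentinel replaces ----

theorem p2_cons (c : Char) (x : List Char) (h : ¬ (c = '\\' ∧ x.head? = some '$')) :
    repAll (c :: x) ['\\', '$'] pvSentinel = c :: repAll x ['\\', '$'] pvSentinel := by
  rw [repAll, if_neg]
  intro hp
  rw [List.isPrefixOf_iff_prefix] at hp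
  obtain ⟨hc, hp2⟩ := List.cons_prefix_cons.mp hp
  rcases x with _ | ⟨c2, x⟩
  · exact absurd hp2.length_le (by simp)
  · exact h ⟨hc.symm, by rw [(List.cons_prefix_cons.mp hp2).1]; rfl⟩

theorem p2_esc (x : List Char) :
    repAll ('\\' :: '$' :: x) ['\\', '$'] pvSentinel
      = pvSentinel ++ repAll x ['\\', '$'] pvSentinel := by
  rw [repAll, if_pos (by simp [List.isPrefixOf])]
  simp

theorem p4_cons (c : Char) (x : List Char) (h : ¬ pvSentinel <+: c :: x) :
    repAll (c :: x) pvSentinel ['$'] = c :: repAll x pvSentinel ['$'] := by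
  rw [repAll, if_neg]
  intro hp
  exact h (List.isPrefixOf_iff_prefix.mp hp)

theorem sentinel_prefix_head (c : Char) (x : List Char) (h : pvSentinel <+: c :: x) : c = 'P' := by
  have := (List.cons_prefix_cons.mp h).1
  exact this.symm

theorem p4_cons_ne (c : Char) (x : List Char) (h : c ≠ 'P') :
    repAll (c :: x) pvSentinel ['$'] = c :: repAll x pvSentinel ['$'] :=
  p4_cons c x (fun hp => h (sentinel_prefix_head c x hp))

theorem p4_sentinel (z : List Char) :
    repAll (pvSentinel ++ z) pvSentinel ['$'] = '$' :: repAll z pvSentinel ['$'] := by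
  have hs : pvSentinel ++ z = 'P' :: (pvSentinel.tail ++ z) := rfl
  rw [hs, repAll, if_pos]
  · have : (pvSentinel.tail ++ z).drop (pvSentinel.length - 1) = z := by
      have h26 : pvSentinel.length - 1 = pvSentinel.tail.length := rfl
      rw [h26, List.drop_left]
    rw [this]
    rfl
  · rw [List.isPrefixOf_iff_prefix, ← hs]
    exact List.prefix_append _ _

theorem scanS_append (u v : List Char) (h : '$' ∉ u) (b : Bool) :
    scanS (u ++ v) b = u ++ scanS v b := by
  induction u with
  | nil => simp
  | cons c u ih =>
    have hc : c ≠ '$' := fun hx => h (by simp [hx])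
    rw [List.cons_append, scanS_cons _ _ _ hc, ih (fun hx => h (List.mem_cons_of_mem _ hx))]
    rfl

-- ---- step equations for A's fused phases 1-3 (scanS ∘ P2 ∘ scanDD) ----

def Imid (l : List Char) (d b : Bool) : List Char :=
  scanS (repAll (scanDD l d) ['\\', '$'] pvSentinel) b

theorem Imid_nil (d b : Bool) : Imid [] d b = [] := by
  unfold Imid
  rw [show scanDD [] d = [] from rfl, repAll]
  rfl

theorem Imid_pair (r : List Char) (d b : Bool) :
    Imid ('$' :: '$' :: r) d b
      = (if d then ['\\', '['] else ['\\', ']']) ++ Imid r (!d) b := by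
  unfold Imid
  cases d
  · have h1 : scanDD ('$' :: '$' :: r) false = '\\' :: ']' :: scanDD r true := by
      simp [scanDD]
    rw [h1, p2_cons _ _ (by simp), p2_cons _ _ (by simp),
      scanS_cons _ _ _ (by decide), scanS_cons _ _ _ (by decide)]
    rfl
  · have h1 : scanDD ('$' :: '$' :: r) true = '\\' :: '[' :: scanDD r false := by
      simp [scanDD]
    rw [h1, p2_cons _ _ (by simp), p2_cons _ _ (by simp),
      scanS_cons _ _ _ (by decide), scanS_cons _ _ _ (by decide)]
    rfl

theorem scanDD_cons_of_head (r : List Char) (d : Bool) (h : r.head? ≠ some '$') :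
    scanDD ('$' :: r) d = '$' :: scanDD r d := by
  rcases r with _ | ⟨c2, r2⟩
  · simp [scanDD]
  · exact scanDD_cons2 _ _ _ (by simpa using h)

theorem Imid_lone (r : List Char) (d b : Bool) (h : r.head? ≠ some '$') :
    Imid ('$' :: r) d b
      = (if b then ['\\', '('] else ['\\', ')']) ++ Imid r d (!b) := by
  unfold Imid
  rw [scanDD_cons_of_head _ _ h, p2_cons _ _ (by simp)]
  simp [scanS]

theorem Imid_escape (r : List Char) (d b : Bool) (h : r.head? ≠ some '$') :
    Imid ('\\' :: '$' :: r) d b = pvSentinel ++ Imid r d b := by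
  unfold Imid
  rw [scanDD_cons _ _ _ (by decide), scanDD_cons_of_head _ _ h, p2_esc,
    scanS_append _ _ (by decide)]

theorem Imid_bs_pair (r : List Char) (d b : Bool) :
    Imid ('\\' :: '$' :: '$' :: r) d b = '\\' :: Imid ('$' :: '$' :: r) d b := by
  unfold Imid
  rw [scanDD_cons _ _ _ (by decide), p2_cons _ _ (by
    rintro ⟨-, h2⟩
    cases d <;> simp [scanDD] at h2), scanS_cons _ _ _ (by decide)]

theorem Imid_bs_other (r : List Char) (d b : Bool) (h : r.head? ≠ some '$') :
    Imid ('\\' :: r) d b = '\\' :: Imid r d b := by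
  unfold Imid
  have hhead : (scanDD r d).head? ≠ some '$' := by
    rcases r with _ | ⟨c2, r2⟩
    · simp [scanDD]
    · have hc2 : c2 ≠ '$' := by simpa using h
      rw [scanDD_cons _ _ _ hc2]
      simpa using hc2
  rw [scanDD_cons _ _ _ (by decide), p2_cons _ _ (by rintro ⟨-, h2⟩; exact hhead h2),
    scanS_cons _ _ _ (by decide)]

theorem Imid_other (c : Char) (r : List Char) (d b : Bool) (hc : c ≠ '$') (hb : c ≠ '\\') :
    Imid (c :: r) d b = c :: Imid r d b := by
  unfold Imid
  rw [scanDD_cons _ _ _ hc, p2_cons _ _ (by rintro ⟨h1, -⟩; exact hb h1),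
    scanS_cons _ _ _ hc]

-- ---- step equations for B's scan ----

theorem scanB_pair (r : List Char) (d b : Bool) :
    scanB ('$' :: '$' :: r) d b = (if d then ['\\', '['] else ['\\', ']']) ++ scanB r (!d) b := by
  simp [scanB]

theorem scanB_lone (r : List Char) (d b : Bool) (h : r.head? ≠ some '$') :
    scanB ('$' :: r) d b = (if b then ['\\', '('] else ['\\', ')']) ++ scanB r d (!b) := by
  rcases r with _ | ⟨c2, r2⟩
  · simp [scanB]
  · have hc2 : c2 ≠ '$' := by simpa using h
    simp [scanB, hc2]

theorem scanB_esc (r : List Char) (d b : Bool) (h : r.head? ≠ some '$') :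
    scanB ('\\' :: '$' :: r) d b = '$' :: scanB r d b := by
  rcases r with _ | ⟨c2, r2⟩
  · simp [scanB]
  · have hc2 : c2 ≠ '$' := by simpa using h
    simp [scanB, hc2]

theorem scanB_bs_pair (r : List Char) (d b : Bool) :
    scanB ('\\' :: '$' :: '$' :: r) d b = '\\' :: scanB ('$' :: '$' :: r) d b := by
  simp [scanB]

theorem scanB_bs_other (r : List Char) (d b : Bool) (h : r.head? ≠ some '$') :
    scanB ('\\' :: r) d b = '\\' :: scanB r d b := by
  rcases r with _ | ⟨c2, r2⟩
  · simp [scanB]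
  · have hc2 : c2 ≠ '$' := by simpa using h
    rcases r2 with _ | ⟨c3, r3⟩ <;> simp [scanB, hc2]

theorem scanB_other (c : Char) (r : List Char) (d b : Bool) (hc : c ≠ '$') (hb : c ≠ '\\') :
    scanB (c :: r) d b = c :: scanB r d b := by
  rcases r with _ | ⟨c2, r2⟩
  · simp [scanB, hc]
  · rcases r2 with _ | ⟨c3, r3⟩ <;> simp [scanB, hc, hb]

-- no nonempty proper suffix of the sentinel is also a prefix of it
theorem sentinel_no_border (t : List Char) (hs : t <:+ pvSentinel) (hp : t <+: pvSentinel) :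
    t = [] ∨ t = pvSentinel := by
  have hlen : t.length ≤ pvSentinel.length := hs.length_le
  have htake : t = pvSentinel.take t.length := List.prefix_iff_eq_take.mp hp
  have hdrop : t = pvSentinel.drop (pvSentinel.length - t.length) := List.suffix_iff_eq_drop.mp hs
  have key : ∀ k, k < 28 → pvSentinel.take k = pvSentinel.drop (pvSentinel.length - k) →
      (k = 0 ∨ k = 27) := by decide
  rcases key t.length (by simp [pvSentinel] at hlen; omega) (by rw [← htake, ← hdrop]) with h0 | h27
  · left; rw [htake, h0]; rfl
  · right; rw [htake, h27]; rfl

-- a nonempty proper suffix of the sentinel that prefixes A's phase-3 value prefixes the input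
theorem sentinel_chars : ∀ a ∈ pvSentinel, a ≠ '\\' ∧ a ≠ '$' := by
  have h : pvSentinel.all (fun a => !(a == '\\') && !(a == '$')) = true := by rfl
  intro a ha
  have h2 := List.all_eq_true.mp h a ha
  simp at h2
  exact h2

theorem head_frag : ∀ (n : Nat) (l : List Char) (d b : Bool) (t : List Char), l.length ≤ n →
    t <:+ pvSentinel → t ≠ [] → t ≠ pvSentinel →
    t <+: Imid l d b → t <+: l := by
  intro n
  induction n with
  | zero =>
    intro l d b t hlen hsuf hne hnS hpre
    have hl : l = [] := List.eq_nil_of_length_eq_zero (by omega)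
    subst hl
    rw [Imid_nil] at hpre
    exact absurd (List.prefix_nil.mp hpre) hne
  | succ n ih =>
    intro l d b t hlen hsuf hne hnS hpre
    have hchars : ∀ a ∈ t, a ≠ '\\' ∧ a ≠ '$' := fun a ha => sentinel_chars a (hsuf.subset ha)
    have htlen : t.length ≤ pvSentinel.length := hsuf.length_le
    rcases t with - | ⟨a, t'⟩
    · exact absurd rfl hne
    rcases l with - | ⟨c, r⟩
    · rw [Imid_nil] at hpre
      exact absurd (List.prefix_nil.mp hpre) (by simp)
    by_cases hc : c = '$'
    · subst hc
      exfalso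
      by_cases hr : r.head? = some '$'
      · rcases r with - | ⟨c2, r2⟩
        · simp at hr
        have hc2 : c2 = '$' := by simpa using hr
        subst hc2
        rw [Imid_pair] at hpre
        have ha : a = '\\' := by
          cases d <;> exact ((List.cons_prefix_cons.mp hpre).1)
        exact (hchars a (by simp)).1 ha
      · rw [Imid_lone _ _ _ hr] at hpre
        have ha : a = '\\' := by
          cases b <;> exact ((List.cons_prefix_cons.mp hpre).1)
        exact (hchars a (by simp)).1 ha
    · by_cases hb : c = '\\'
      · subst hb
        exfalso
        rcases r with - | ⟨c2, r2⟩
        · rw [Imid_bs_other _ _ _ (by simp)] at hpre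
          exact (hchars a (by simp)).1 (List.cons_prefix_cons.mp hpre).1
        by_cases hc2 : c2 = '$'
        · subst hc2
          by_cases hr2 : r2.head? = some '$'
          · rcases r2 with - | ⟨c3, r3⟩
            · simp at hr2
            have hc3 : c3 = '$' := by simpa using hr2
            subst hc3
            rw [Imid_bs_pair] at hpre
            exact (hchars a (by simp)).1 (List.cons_prefix_cons.mp hpre).1
          · rw [Imid_escape _ _ _ hr2] at hpre
            have htake : a :: t' = pvSentinel.take (a :: t').length := by
              have h1 := List.prefix_iff_eq_take.mp hpre
              rwa [List.take_append_of_le_length htlen] at h1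
            have hpreS : a :: t' <+: pvSentinel := by
              rw [htake]
              exact List.take_prefix _ _
            rcases sentinel_no_border _ hsuf hpreS with h0 | hS
            · exact hne h0
            · exact hnS hS
        · rw [Imid_bs_other _ _ _ (by simpa using hc2)] at hpre
          exact (hchars a (by simp)).1 (List.cons_prefix_cons.mp hpre).1
      · rw [Imid_other _ _ _ _ hc hb] at hpre
        obtain ⟨hac, hpre'⟩ := List.cons_prefix_cons.mp hpre
        rcases t' with - | ⟨a2, t''⟩
        · rw [hac]
          exact List.cons_prefix_cons.mpr ⟨rfl, List.nil_prefix⟩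
        · have hsuf' : a2 :: t'' <:+ pvSentinel := (List.tail_suffix (a :: a2 :: t'')).trans hsuf
          have hnS' : a2 :: t'' ≠ pvSentinel := by
            intro hEq
            have h1 := htlen
            rw [← hEq] at h1
            simp only [List.length_cons] at h1
            omega
          have := ih r d b (a2 :: t'') (by simp at hlen; omega) hsuf' (by simp) hnS' hpre'
          rw [hac]
          exact List.cons_prefix_cons.mpr ⟨rfl, this⟩

-- the heart: A's four phases fused equal B's single scan, away from sentinel-containing inputs
theorem main_eq : ∀ (n : Nat) (l : List Char) (d b : Bool), l.length ≤ n →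
    ¬ pvSentinel <:+: l →
    repAll (Imid l d b) pvSentinel ['$'] = scanB l d b := by
  intro n
  induction n with
  | zero =>
    intro l d b hlen _
    have hl : l = [] := List.eq_nil_of_length_eq_zero (by omega)
    subst hl
    rw [Imid_nil, repAll]
    rfl
  | succ n ih =>
    intro l d b hlen hnS
    have htail : ∀ m : List Char, m <:+ l → ¬ pvSentinel <:+: m :=
      fun m hm hi => hnS (hi.trans hm.isInfix)
    rcases l with - | ⟨c, r⟩
    · rw [Imid_nil, repAll]; rfl
    by_cases hc : c = '$'
    · subst hc
      by_cases hr : r.head? = some '$'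
      · rcases r with - | ⟨c2, r2⟩
        · simp at hr
        have hc2 : c2 = '$' := by simpa using hr
        subst hc2
        rw [Imid_pair, scanB_pair]
        have hS2 := htail r2 ((List.suffix_cons _ _).trans (List.suffix_cons _ _))
        cases d <;>
        · simp only [Bool.not_true, Bool.not_false, Bool.false_eq_true, if_true, if_false,
            List.cons_append, List.nil_append]
          rw [p4_cons_ne _ _ (by decide), p4_cons_ne _ _ (by decide),
            ih r2 _ b (by simp at hlen; omega) hS2]
      · rw [Imid_lone _ _ _ hr, scanB_lone _ _ _ hr]
        have hS2 := htail r (List.suffix_cons _ _)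
        cases b <;>
        · simp only [Bool.not_true, Bool.not_false, Bool.false_eq_true, if_true, if_false,
            List.cons_append, List.nil_append]
          rw [p4_cons_ne _ _ (by decide), p4_cons_ne _ _ (by decide),
            ih r d _ (by simp at hlen; omega) hS2]
    · by_cases hb : c = '\\'
      · subst hb
        rcases r with - | ⟨c2, r2⟩
        · rw [Imid_bs_other _ _ _ (by simp), scanB_bs_other _ _ _ (by simp),
            p4_cons_ne _ _ (by decide), Imid_nil, repAll]
          rfl
        by_cases hc2 : c2 = '$'
        · subst hc2
          by_cases hr2 : r2.head? = some '$'
          · rcases r2 with - | ⟨c3, r3⟩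
            · simp at hr2
            have hc3 : c3 = '$' := by simpa using hr2
            subst hc3
            rw [Imid_bs_pair, Imid_pair, scanB_bs_pair, scanB_pair]
            have hS2 := htail r3 (((List.suffix_cons _ _).trans (List.suffix_cons _ _)).trans
              (List.suffix_cons _ _))
            cases d <;>
            · simp only [Bool.not_true, Bool.not_false, Bool.false_eq_true, if_true, if_false,
                List.cons_append, List.nil_append]
              rw [p4_cons_ne _ _ (by decide), p4_cons_ne _ _ (by decide),
                p4_cons_ne _ _ (by decide), ih r3 _ b (by simp at hlen; omega) hS2]
          · rw [Imid_escape _ _ _ hr2, scanB_esc _ _ _ hr2, p4_sentinel]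
            rw [ih r2 d b (by simp at hlen; omega)
              (htail r2 ((List.suffix_cons _ _).trans (List.suffix_cons _ _)))]
        · rw [Imid_bs_other _ _ _ (by simpa using hc2),
            scanB_bs_other _ _ _ (by simpa using hc2), p4_cons_ne _ _ (by decide),
            ih (c2 :: r2) d b (by simp only [List.length_cons] at hlen ⊢; omega) (htail (c2 :: r2) (List.suffix_cons _ _))]
      · rw [Imid_other _ _ _ _ hc hb, scanB_other _ _ _ _ hc hb]
        have hstep : repAll (c :: Imid r d b) pvSentinel ['$'] = c :: repAll (Imid r d b) pvSentinel ['$'] := by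
          by_cases hcP : c = 'P'
          · subst hcP
            refine p4_cons _ _ ?_
            intro hp
            have hSE : pvSentinel = 'P' :: pvSentinel.tail := rfl
            rw [hSE] at hp
            have h2 := (List.cons_prefix_cons.mp hp).2
            have h3 := head_frag n r d b pvSentinel.tail (by simp at hlen; omega)
              (List.tail_suffix _) (by decide) (by decide) h2
            exact hnS (List.IsPrefix.isInfix (by
              rw [hSE]
              exact List.cons_prefix_cons.mpr ⟨rfl, h3⟩))
          · exact p4_cons_ne _ _ hcP
        rw [hstep, ih r d b (by simp at hlen; omega) (htail r (List.suffix_cons _ _))]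


-- ===== VERDICT (by name: the statement is the Claim_ definition above) =====
-- ---- tightness: inside D_ the two programs always differ ----

-- no suffix fragment of the sentinel survives as a prefix of A's final replace-all output
theorem p4_pref : ∀ (n : Nat) (w t : List Char), w.length ≤ n → t <:+ pvSentinel → t ≠ [] →
    t <+: repAll w pvSentinel ['$'] → t <+: w := by
  intro n
  induction n with
  | zero =>
    intro w t hlen _ hne hpre
    have hw : w = [] := List.eq_nil_of_length_eq_zero (by omega)
    subst hw
    rw [repAll] at hpre
    exact absurd (List.prefix_nil.mp hpre) hne
  | succ n ih =>
    intro w t hlen hsuf hne hpre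
    rcases w with - | ⟨c, x⟩
    · rw [repAll] at hpre
      exact absurd (List.prefix_nil.mp hpre) hne
    rcases t with - | ⟨a, t'⟩
    · exact absurd rfl hne
    by_cases hp : pvSentinel <+: c :: x
    · exfalso
      rw [repAll, if_pos (List.isPrefixOf_iff_prefix.mpr hp)] at hpre
      have ha : a = '$' := (List.cons_prefix_cons.mp hpre).1
      exact (sentinel_chars a (hsuf.subset (by simp))).2 ha
    · rw [p4_cons _ _ hp] at hpre
      obtain ⟨hac, hpre'⟩ := List.cons_prefix_cons.mp hpre
      rcases t' with - | ⟨a2, t''⟩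
      · rw [hac]
        exact List.cons_prefix_cons.mpr ⟨rfl, List.nil_prefix⟩
      · have := ih x (a2 :: t'') (by simp at hlen; omega)
          ((List.tail_suffix (a :: a2 :: t'')).trans hsuf) (by simp) hpre'
        rw [hac]
        exact List.cons_prefix_cons.mpr ⟨rfl, this⟩

-- A's final replace-all output never contains the sentinel
theorem p4_no_sentinel : ∀ (n : Nat) (w : List Char), w.length ≤ n →
    ¬ pvSentinel <:+: repAll w pvSentinel ['$'] := by
  intro n
  induction n with
  | zero =>
    intro w hlen hinf
    have hw : w = [] := List.eq_nil_of_length_eq_zero (by omega)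
    subst hw
    rw [repAll] at hinf
    exact absurd (List.eq_nil_of_infix_nil hinf) (by decide)
  | succ n ih =>
    intro w hlen hinf
    rcases w with - | ⟨c, x⟩
    · rw [repAll] at hinf
      exact absurd (List.eq_nil_of_infix_nil hinf) (by decide)
    by_cases hp : pvSentinel <+: c :: x
    · rw [repAll, if_pos (List.isPrefixOf_iff_prefix.mpr hp)] at hinf
      rcases List.infix_cons_iff.mp hinf with hpre | hinf'
      · exact (by decide : ('P':Char) ≠ '$') ((List.cons_prefix_cons.mp hpre).1)
      · exact ih _ (by
          have := List.length_drop (l := x) (i := pvSentinel.length - 1)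
          simp at hlen
          omega) hinf'
    · rw [p4_cons _ _ hp] at hinf
      rcases List.infix_cons_iff.mp hinf with hpre | hinf'
      · have hSE : pvSentinel = 'P' :: pvSentinel.tail := rfl
        have hcP : c = 'P' := by rw [hSE] at hpre; exact ((List.cons_prefix_cons.mp hpre).1).symm
        have h2 : pvSentinel.tail <+: repAll x pvSentinel ['$'] := by
          rw [hSE] at hpre
          exact (List.cons_prefix_cons.mp hpre).2
        have h3 := p4_pref x.length x pvSentinel.tail le_rfl (List.tail_suffix _) (by decide) h2
        exact hp (by
          rw [hSE, hcP]
          exact List.cons_prefix_cons.mpr ⟨rfl, h3⟩)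
      · exact ih x (by simp at hlen; omega) hinf'

-- B's scan copies a run of non-special characters verbatim
theorem scanB_clean (u : List Char) (hu : ∀ a ∈ u, a ≠ '$' ∧ a ≠ '\\') :
    ∀ (v : List Char) (d b : Bool), scanB (u ++ v) d b = u ++ scanB v d b := by
  induction u with
  | nil => intro v d b; rfl
  | cons c u' ih =>
    intro v d b
    have hc := hu c (by simp)
    rw [List.cons_append, scanB_other _ _ _ _ hc.1 hc.2,
      ih (fun a ha => hu a (by simp [ha])) v d b]
    rfl

-- B's scan maps a split u ++ v (v not starting with '$') to some prefix plus the scan of v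
theorem scanB_split : ∀ (n : Nat) (u v : List Char) (d b : Bool), u.length ≤ n →
    v.head? ≠ some '$' →
    ∃ w d' b', scanB (u ++ v) d b = w ++ scanB v d' b' := by
  intro n
  induction n with
  | zero =>
    intro u v d b hlen _
    have hu : u = [] := List.eq_nil_of_length_eq_zero (by omega)
    subst hu
    exact ⟨[], d, b, rfl⟩
  | succ n ih =>
    intro u v d b hlen hv
    rcases u with - | ⟨c, u'⟩
    · exact ⟨[], d, b, rfl⟩
    by_cases hc : c = '$'
    · subst hc
      rcases u' with - | ⟨c2, u2⟩
      · rw [List.cons_append, List.nil_append, scanB_lone _ _ _ hv]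
        exact ⟨_, d, !b, rfl⟩
      by_cases hc2 : c2 = '$'
      · subst hc2
        rw [List.cons_append, List.cons_append, scanB_pair]
        obtain ⟨w, d', b', hw⟩ := ih u2 v (!d) b (by simp at hlen; omega) hv
        exact ⟨_ ++ w, d', b', by rw [hw, List.append_assoc]⟩
      · have hh : ((c2 :: u2) ++ v).head? ≠ some '$' := by simpa using hc2
        rw [List.cons_append, scanB_lone _ _ _ hh]
        obtain ⟨w, d', b', hw⟩ := ih (c2 :: u2) v d (!b) (by simp at hlen ⊢; omega) hv
        exact ⟨_ ++ w, d', b', by rw [hw, List.append_assoc]⟩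
    by_cases hb : c = '\\'
    · subst hb
      rcases u' with - | ⟨c2, u2⟩
      · rw [List.cons_append, List.nil_append, scanB_bs_other _ _ _ hv]
        exact ⟨['\\'], d, b, rfl⟩
      by_cases hc2 : c2 = '$'
      · subst hc2
        rcases u2 with - | ⟨c3, u3⟩
        · rw [List.cons_append, List.cons_append, List.nil_append, scanB_esc _ _ _ hv]
          exact ⟨['$'], d, b, rfl⟩
        by_cases hc3 : c3 = '$'
        · subst hc3
          rw [List.cons_append, List.cons_append, List.cons_append, scanB_bs_pair, scanB_pair]
          obtain ⟨w, d', b', hw⟩ := ih u3 v (!d) b (by simp at hlen; omega) hv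
          refine ⟨'\\' :: ((if d then ['\\', '['] else ['\\', ']']) ++ w), d', b', ?_⟩
          rw [hw, List.cons_append, List.append_assoc]
        · have hh : ((c3 :: u3) ++ v).head? ≠ some '$' := by simpa using hc3
          rw [List.cons_append, List.cons_append, scanB_esc _ _ _ hh]
          obtain ⟨w, d', b', hw⟩ := ih (c3 :: u3) v d b (by simp at hlen ⊢; omega) hv
          exact ⟨'$' :: w, d', b', by rw [hw]; rfl⟩
      · have hh : ((c2 :: u2) ++ v).head? ≠ some '$' := by simpa using hc2
        rw [List.cons_append, scanB_bs_other _ _ _ hh]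
        obtain ⟨w, d', b', hw⟩ := ih (c2 :: u2) v d b (by simp at hlen ⊢; omega) hv
        exact ⟨'\\' :: w, d', b', by rw [hw]; rfl⟩
    · rw [List.cons_append, scanB_other _ _ _ _ hc hb]
      obtain ⟨w, d', b', hw⟩ := ih u' v d b (by simp at hlen; omega) hv
      exact ⟨c :: w, d', b', by rw [hw]; rfl⟩

-- B's output keeps the sentinel whenever the input contains it
theorem scanB_keeps_sentinel (l : List Char) (h : pvSentinel <:+: l) :
    pvSentinel <:+: scanB l true true := by
  obtain ⟨u, v, huv⟩ := h
  have hv : (pvSentinel ++ v).head? ≠ some '$' := by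
    rw [show pvSentinel ++ v = 'P' :: (pvSentinel.tail ++ v) from rfl]
    simp
  obtain ⟨w, d', b', hw⟩ := scanB_split u.length u (pvSentinel ++ v) true true le_rfl hv
  rw [List.append_assoc] at huv
  rw [← huv, hw]
  rw [scanB_clean _ (fun a ha => ⟨(sentinel_chars a ha).2, (sentinel_chars a ha).1⟩)]
  exact ⟨w, scanB v d' b', by rw [List.append_assoc]⟩

theorem fixdollars_spec : Claim_unchanged_fixdollars := by
  intro string _ hD
  rw [fixdollars_eq, fixdollars_alt]
  have hS : ¬ pvSentinel <:+: string.toList := by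
    intro hinf
    exact hD (by
      unfold D_fixdollars
      rw [PySem.Str.isIn_iff_infix]
      exact hinf)
  rw [replace_eq_repAll _ _ _ (by decide), replace_eq_repAll _ _ _ (by decide),
    show scanS (repAll (scanDD string.toList true) ['\\', '$'] pvSentinel) true
        = Imid string.toList true true from rfl,
    main_eq string.toList.length string.toList true true le_rfl hS]

theorem fixdollars_changed : Claim_changed_fixdollars := by
  unfold Claim_changed_fixdollars
  refine ⟨by decide, by decide, ?_, by decide, by decide⟩
  rw [fixdollars_eq]
  decide

theorem fixdollars_tight : Claim_exact_fixdollars := by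
  intro string _ hD hEq
  have hlist := congrArg String.toList hEq
  rw [fixdollars_eq, fixdollars_alt] at hlist
  simp only [String.toList_ofList] at hlist
  have hSin : pvSentinel <:+: string.toList := by
    have := hD
    unfold D_fixdollars at this
    rw [PySem.Str.isIn_iff_infix] at this
    exact this
  have hB := scanB_keeps_sentinel string.toList hSin
  rw [← hlist] at hB
  rw [replace_eq_repAll _ _ _ (by decide)] at hB
  exact p4_no_sentinel _ _ le_rfl hB
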